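-- pv_equiv track=rewrite | github.com/ZendorXX/SWGOH-Scripts | main.py | phase_total
-- ===== SOURCE A (Python) =====
-- def phase_total(planet_list: list[dict]) -> dict: #TODO: correct adding units with different relics
--     total = {}
--
--     for planet in planet_list:
--         for unit in planet.keys():
--             if unit not in total or total[unit][1] != planet[unit][1]:
--                 total[unit] = [planet[unit][0], planet[unit][1]]
--                 continue
--
--             total[unit][0] += planet[unit][0]
--
--     #return dict(sorted(total.items(), key=lambda item: (-item[1][0], item[0])))
--     return total
-- ===== SOURCE B (Python) =====
-- def phase_total(planet_list: list[dict]) -> dict: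
--     # Phase 1: group each unit's entries in encounter order.
--     groups = {}
--     for planet in planet_list:
--         for unit, entry in planet.items():
--             groups.setdefault(unit, []).append(entry)
--
--     # Phase 2: fold each unit's entries: reset on relic mismatch, else add counts.
--     total = {}
--     for unit, entries in groups.items():
--         acc = None
--         for entry in entries:
--             if acc is None or acc[1] != entry[1]:
--                 acc = [entry[0], entry[1]]
--             else:
--                 acc = [acc[0] + entry[0], acc[1]]
--         total[unit] = acc
--     return total
-- ===== Notes on version B (the rewrite author's own statement) =====
-- stated objective: alternative
-- what changed: A aggregates in a single interleaved pass that updates one running dict per encountered pair; B first groups each unit's entries per encounter order into a groups dict and then folds each unit's entry list separately (reset on relic mismatch, else add) to build the result.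
import Mathlib
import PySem

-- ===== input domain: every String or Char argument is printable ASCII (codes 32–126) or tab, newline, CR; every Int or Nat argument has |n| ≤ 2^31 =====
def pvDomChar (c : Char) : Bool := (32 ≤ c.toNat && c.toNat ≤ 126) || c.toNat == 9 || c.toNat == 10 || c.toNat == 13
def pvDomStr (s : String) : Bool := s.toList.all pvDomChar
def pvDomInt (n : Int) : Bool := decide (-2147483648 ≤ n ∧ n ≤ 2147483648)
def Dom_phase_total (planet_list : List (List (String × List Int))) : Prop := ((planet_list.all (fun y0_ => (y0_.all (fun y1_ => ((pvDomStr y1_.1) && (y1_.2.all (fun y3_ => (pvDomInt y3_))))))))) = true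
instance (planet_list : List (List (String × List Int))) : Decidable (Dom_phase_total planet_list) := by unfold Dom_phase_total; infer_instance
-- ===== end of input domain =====

-- B re-decomposes A's single interleaved dict pass into a group-by-unit phase followed by
-- a per-unit fold (objective: alternative decomposition; return value only — neither mutates).

-- ===== PORT A =====
-- A's inner-loop body for one (unit, planet[unit]) pair; under Pre_ each planet dict has
-- unique keys, so iterating its (key, value) pairs is exactly 'for unit in planet.keys()'.
def pvStepA (total : PySem.Dict String (List Int)) (p : String × List Int) :
    PySem.Dict String (List Int) :=
  if total.contains p.1 = false ∨
      PySem.List.pyGetD (total.getD p.1 []) 1 0 ≠ PySem.List.pyGetD p.2 1 0 then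
    total.insert p.1 [PySem.List.pyGetD p.2 0 0, PySem.List.pyGetD p.2 1 0]
  else
    total.modify p.1 []
      (fun l => PySem.List.pySetD l 0 (PySem.List.pyGetD l 0 0 + PySem.List.pyGetD p.2 0 0))

def phase_total (planet_list : List (List (String × List Int))) : List (String × List Int) :=
  (planet_list.foldl (fun total planet => planet.foldl pvStepA total) PySem.Dict.empty).items

-- ===== PORT B =====
-- B phase 1: groups.setdefault(unit, []).append(entry)
def pvStepG (g : PySem.Dict String (List (List Int))) (p : String × List Int) :
    PySem.Dict String (List (List Int)) :=
  g.modify p.1 [] (· ++ [p.2])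

-- B phase 2 inner fold step on the accumulator
def pvAccStep (acc : Option (Int × Int)) (entry : List Int) : Option (Int × Int) :=
  match acc with
  | none => some (PySem.List.pyGetD entry 0 0, PySem.List.pyGetD entry 1 0)
  | some a =>
    if a.2 ≠ PySem.List.pyGetD entry 1 0 then
      some (PySem.List.pyGetD entry 0 0, PySem.List.pyGetD entry 1 0)
    else
      some (a.1 + PySem.List.pyGetD entry 0 0, a.2)

def pvAccFinish (es : List (List Int)) : List Int :=
  (es.foldl pvAccStep none).elim [] (fun a => [a.1, a.2])

def phase_total_alt (planet_list : List (List (String × List Int))) : List (String × List Int) :=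
  let groups : PySem.Dict String (List (List Int)) :=
    planet_list.foldl (fun g planet => planet.foldl pvStepG g) PySem.Dict.empty
  (groups.items.foldl (fun total ue => total.insert ue.1 (pvAccFinish ue.2))
    (PySem.Dict.empty : PySem.Dict String (List Int))).items

-- ===== PRECONDITION & SPEC =====
-- Pre_ excludes (a) planets whose value lists have fewer than 2 elements, on which Python A
-- raises IndexError at planet[unit][1], and (b) association lists with duplicate keys inside
-- one planet, which cannot arise from a Python dict argument.
def Pre_phase_total (planet_list : List (List (String × List Int))) : Prop :=
  ∀ planet ∈ planet_list, (planet.map Prod.fst).Nodup ∧ ∀ p ∈ planet, 2 ≤ p.2.length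
instance (planet_list : List (List (String × List Int))) : Decidable (Pre_phase_total planet_list) := by unfold Pre_phase_total; infer_instance

def pvWitness_phase_total : (List (List (String × List Int))) :=
  [[("a", [1, 2]), ("b", [5, 1])], [("a", [3, 2])]]

def Spec_phase_total (planet_list : List (List (String × List Int))) (out : List (String × List Int)) : Prop := out = phase_total_alt planet_list
instance (planet_list : List (List (String × List Int))) (out : List (String × List Int)) : Decidable (Spec_phase_total planet_list out) := by unfold Spec_phase_total; infer_instance

-- ===== CLAIM (what is proved, stated in full; the proofs are below) =====
def Claim_equal_phase_total : Prop := ∀ (planet_list : List (List (String × List Int))), Dom_phase_total planet_list → Pre_phase_total planet_list → Spec_phase_total planet_list (phase_total planet_list)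

-- ===== LEMMAS AND PROOFS =====

-- A's running total, reconstructed from B's groups dict.
def pvMkT (g : PySem.Dict String (List (List Int))) : PySem.Dict String (List Int) :=
  PySem.Dict.mk (g.items.map (fun ue => (ue.1, pvAccFinish ue.2)))

-- invariant of the groups dict
def pvInv (g : PySem.Dict String (List (List Int))) : Prop :=
  g.keys.Nodup ∧ ∀ v ∈ g.values, v ≠ []

theorem pvAcc_some (es : List (List Int)) (a : Int × Int) :
    ∃ b, es.foldl pvAccStep (some a) = some b := by
  induction es generalizing a with
  | nil => exact ⟨a, rfl⟩
  | cons e es ih =>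
    simp only [List.foldl_cons, pvAccStep]
    split_ifs <;> exact ih _

theorem pvContains_mkT (g : PySem.Dict String (List (List Int))) (k : String) :
    (pvMkT g).contains k = g.contains k := by
  simp [pvMkT, PySem.Dict.contains, List.any_map, Function.comp_def]

theorem pvKeys_mkT (g : PySem.Dict String (List (List Int))) :
    (pvMkT g).keys = g.keys := by
  simp [pvMkT, PySem.Dict.keys, List.map_map, Function.comp_def]

theorem pvStep_comm (g : PySem.Dict String (List (List Int))) (p : String × List Int)
    (hg : pvInv g) : pvStepA (pvMkT g) p = pvMkT (pvStepG g p) := by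
  obtain ⟨hnd, hne⟩ := hg
  by_cases hc : g.contains p.1 = true
  · -- key already present
    obtain ⟨es, hes⟩ : ∃ es, g.get? p.1 = some es := by
      rcases h : g.get? p.1 with _ | es
      · rw [PySem.Dict.contains_eq_isSome_get?, h] at hc; simp at hc
      · exact ⟨es, rfl⟩
    have hmem : (p.1, es) ∈ g.items := PySem.Dict.mem_items_of_get?_eq_some g hes
    have hesne : es ≠ [] := hne es (by simpa [PySem.Dict.values] using List.mem_map_of_mem (f := Prod.snd) hmem)
    obtain ⟨a, ha⟩ : ∃ a, es.foldl pvAccStep none = some a := by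
      rcases es with _ | ⟨e, es'⟩
      · exact absurd rfl hesne
      · exact pvAcc_some es' _
    have hget : (pvMkT g).get? p.1 = some (pvAccFinish es) := by
      apply PySem.Dict.get?_of_mem_items
      · exact List.mem_map_of_mem hmem
      · rw [pvKeys_mkT]; exact hnd
    have hgetD : (pvMkT g).getD p.1 [] = pvAccFinish es := by
      simp [PySem.Dict.getD, hget]
    have hfin : pvAccFinish es = [a.1, a.2] := by simp [pvAccFinish, ha]
    have hcT : (pvMkT g).contains p.1 = true := by rw [pvContains_mkT]; exact hc
    have hgetDg : g.getD p.1 [] = es := by simp [PySem.Dict.getD, hes]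
    have hfin' : pvAccFinish (es ++ [p.2]) =
        if a.2 ≠ PySem.List.pyGetD p.2 1 0 then
          [PySem.List.pyGetD p.2 0 0, PySem.List.pyGetD p.2 1 0]
        else [a.1 + PySem.List.pyGetD p.2 0 0, a.2] := by
      simp only [pvAccFinish, List.foldl_append, ha, List.foldl_cons, List.foldl_nil, pvAccStep]
      split_ifs <;> rfl
    have hmap : ∀ (v : List Int),
        (PySem.Dict.mk ((pvMkT g).items.map
          (fun q => if (q.1 == p.1) = true then (p.1, v) else q)) :
            PySem.Dict String (List Int)) =
          pvMkT (PySem.Dict.mk (g.items.map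
            (fun q => if (q.1 == p.1) = true then (p.1, es ++ [p.2]) else q)))
          → True := fun _ _ => trivial
    by_cases hrel : PySem.List.pyGetD ((pvMkT g).getD p.1 []) 1 0 ≠ PySem.List.pyGetD p.2 1 0
    · -- relic mismatch: both sides overwrite the value at p.1
      have ha2 : a.2 ≠ PySem.List.pyGetD p.2 1 0 := by
        rw [hgetD, hfin] at hrel; simpa using hrel
      rw [pvStepA, if_pos (Or.inr hrel)]
      apply PySem.Dict.ext
      rw [PySem.Dict.items_insert_of_contains _ _ hcT]
      show _ = (pvMkT (pvStepG g p)).items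
      rw [pvStepG, PySem.Dict.modify, hgetDg,
        show (pvMkT (g.insert p.1 (es ++ [p.2]))).items
          = (g.insert p.1 (es ++ [p.2])).items.map (fun ue => (ue.1, pvAccFinish ue.2)) from rfl,
        PySem.Dict.items_insert_of_contains _ _ hc]
      show ((g.items.map (fun ue => (ue.1, pvAccFinish ue.2))).map _) = _
      rw [List.map_map, List.map_map]
      apply List.map_congr_left
      intro q hq
      by_cases hk : q.1 = p.1 <;>
        simp [Function.comp, hk, hfin', ha2]
    · -- same relic: A adds in place, B's fold adds
      have ha2 : a.2 = PySem.List.pyGetD p.2 1 0 := by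
        rw [hgetD, hfin] at hrel; simpa using hrel
      rw [pvStepA, if_neg (by simp only [not_or]; exact ⟨by simp [hcT], hrel⟩)]
      rw [PySem.Dict.modify, hgetD, hfin]
      have hset : PySem.List.pySetD [a.1, a.2] 0
          (PySem.List.pyGetD [a.1, a.2] 0 0 + PySem.List.pyGetD p.2 0 0)
          = [a.1 + PySem.List.pyGetD p.2 0 0, a.2] := by
        have h0 : PySem.List.pyGetD [a.1, a.2] (0 : Int) 0 = a.1 := by
          simp [PySem.List.pyGetD_ofNat']
        have h1 : PySem.List.pySetD [a.1, a.2] ((0 : Nat) : Int) _ = _ :=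
          PySem.List.pySetD_natCast [a.1, a.2] 0
            (PySem.List.pyGetD [a.1, a.2] 0 0 + PySem.List.pyGetD p.2 0 0)
        simpa [h0] using h1
      rw [hset]
      apply PySem.Dict.ext
      rw [PySem.Dict.items_insert_of_contains _ _ hcT]
      show _ = (pvMkT (pvStepG g p)).items
      rw [pvStepG, PySem.Dict.modify, hgetDg,
        show (pvMkT (g.insert p.1 (es ++ [p.2]))).items
          = (g.insert p.1 (es ++ [p.2])).items.map (fun ue => (ue.1, pvAccFinish ue.2)) from rfl,
        PySem.Dict.items_insert_of_contains _ _ hc]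
      show ((g.items.map (fun ue => (ue.1, pvAccFinish ue.2))).map _) = _
      rw [List.map_map, List.map_map]
      apply List.map_congr_left
      intro q hq
      by_cases hk : q.1 = p.1 <;>
        simp [Function.comp, hk, hfin', ha2]
  · -- fresh key: both sides append
    have hc' : g.contains p.1 = false := by simpa using hc
    have hcT : (pvMkT g).contains p.1 = false := by rw [pvContains_mkT]; exact hc'
    rw [pvStepA, if_pos (Or.inl hcT)]
    apply PySem.Dict.ext
    rw [PySem.Dict.items_insert_of_not_contains _ _ hcT]
    show _ = (pvMkT (pvStepG g p)).items
    rw [pvStepG, PySem.Dict.modify, PySem.Dict.getD_of_not_contains _ _ hc',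
      show (pvMkT (g.insert p.1 ([] ++ [p.2]))).items
        = (g.insert p.1 ([] ++ [p.2])).items.map (fun ue => (ue.1, pvAccFinish ue.2)) from rfl,
      PySem.Dict.items_insert_of_not_contains _ _ hc']
    simp [pvMkT, pvAccFinish, pvAccStep]

theorem pvInv_step (g : PySem.Dict String (List (List Int))) (p : String × List Int)
    (hg : pvInv g) : pvInv (pvStepG g p) := by
  obtain ⟨hnd, hne⟩ := hg
  refine ⟨PySem.Dict.nodup_keys_insert _ _ _ hnd, fun v hv => ?_⟩
  rcases PySem.Dict.mem_values_insert _ _ _ _ hv with h | h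
  · subst h; simp
  · exact hne v h

theorem pvInv_foldl (l : List (String × List Int)) (g : PySem.Dict String (List (List Int)))
    (hg : pvInv g) : pvInv (l.foldl pvStepG g) := by
  induction l generalizing g with
  | nil => exact hg
  | cons p l ih => exact ih _ (pvInv_step _ _ hg)

theorem pvFold_comm (l : List (String × List Int)) (g : PySem.Dict String (List (List Int)))
    (hg : pvInv g) : l.foldl pvStepA (pvMkT g) = pvMkT (l.foldl pvStepG g) := by
  induction l generalizing g with
  | nil => rfl
  | cons p l ih =>
    simp only [List.foldl_cons, pvStep_comm g p hg]
    exact ih _ (pvInv_step _ _ hg)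

theorem pvFold_comm_outer (pls : List (List (String × List Int)))
    (g : PySem.Dict String (List (List Int))) (hg : pvInv g) :
    pls.foldl (fun t pl => pl.foldl pvStepA t) (pvMkT g) =
      pvMkT (pls.foldl (fun g pl => pl.foldl pvStepG g) g) := by
  induction pls generalizing g with
  | nil => rfl
  | cons pl pls ih =>
    simp only [List.foldl_cons, pvFold_comm pl g hg]
    exact ih _ (pvInv_foldl _ _ hg)

theorem pvInv_foldl_outer (pls : List (List (String × List Int)))
    (g : PySem.Dict String (List (List Int))) (hg : pvInv g) :
    pvInv (pls.foldl (fun g pl => pl.foldl pvStepG g) g) := by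
  induction pls generalizing g with
  | nil => exact hg
  | cons pl pls ih => exact ih _ (pvInv_foldl _ _ hg)

theorem pvInv_empty : pvInv (PySem.Dict.empty : PySem.Dict String (List (List Int))) := by
  constructor
  · simp [PySem.Dict.keys, PySem.Dict.empty]
  · simp [PySem.Dict.values, PySem.Dict.empty]

-- ===== VERDICT (by name: the statement is the Claim_ definition above) =====
theorem phase_total_spec : Claim_equal_phase_total := by
  intro pl _ _
  unfold Spec_phase_total phase_total phase_total_alt
  have hmain := pvFold_comm_outer pl PySem.Dict.empty pvInv_empty
  have hGinv := pvInv_foldl_outer pl PySem.Dict.empty pvInv_empty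
  set G := pl.foldl (fun g planet => planet.foldl pvStepG g) PySem.Dict.empty with hG
  have hempty : pvMkT (PySem.Dict.empty : PySem.Dict String (List (List Int)))
      = (PySem.Dict.empty : PySem.Dict String (List Int)) := rfl
  rw [hempty] at hmain
  rw [hmain]
  have hfold := PySem.Dict.items_foldl_insert_fresh G.items (fun ue => ue.1)
      (fun ue => pvAccFinish ue.2) (PySem.Dict.empty : PySem.Dict String (List Int))
      (fun a _ => by simp [PySem.Dict.contains_empty])
      (by simpa [PySem.Dict.keys] using hGinv.1)
  simp only [hfold]
  rfl
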